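-- pv_equiv track=rewrite | github.com/gloriabenoit/BWT-Mapper | src/mapper.py | get_indexes
-- ===== SOURCE A (Python) =====
-- def get_indexes(bwt):
--     """ Get position indexes and cumulative indexes.
--
--     Parameters
--     ----------
--     bwt : str
--         Burrows–Wheeler transform.
--
--     Returns
--     -------
--     list
--         Position indexes.
--     dict
--         Cumulative indexes, with nucleotide as keys and starting position
--         index as values.
--     """
--     all_values = sorted(list(set(bwt)))
--     num_id = {}
--     cumul = {}
--
--     for value in all_values:
--         num_id[value] = 0
--         cumul[value] = 0
--
--     num = []
--     for char in bwt:
--         num.append(num_id[char])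
--         num_id[char] += 1
--
--     prev_count = 0
--     for char, count in num_id.items():
--         cumul[char] = prev_count
--         prev_count += count
--
--     return num, cumul
-- ===== SOURCE B (Python) =====
-- def get_indexes(bwt):
--     seq = list(bwt)
--     chars = sorted(set(seq))
--     num = [seq[:i].count(c) for i, c in enumerate(seq)]
--     cumul = {}
--     start = 0
--     for c in chars:
--         cumul[c] = start
--         start += seq.count(c)
--     return num, cumul
-- ===== Notes on version B (the rewrite author's own statement) =====
-- stated objective: simpler
-- what changed: Replaces A's streaming per-character counter dict (and the pre-zeroed num_id/cumul dicts) with a direct per-index prefix count comprehension for ranks and a single running-offset loop over the sorted alphabet using seq.count for cumulative starts.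
import Mathlib
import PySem

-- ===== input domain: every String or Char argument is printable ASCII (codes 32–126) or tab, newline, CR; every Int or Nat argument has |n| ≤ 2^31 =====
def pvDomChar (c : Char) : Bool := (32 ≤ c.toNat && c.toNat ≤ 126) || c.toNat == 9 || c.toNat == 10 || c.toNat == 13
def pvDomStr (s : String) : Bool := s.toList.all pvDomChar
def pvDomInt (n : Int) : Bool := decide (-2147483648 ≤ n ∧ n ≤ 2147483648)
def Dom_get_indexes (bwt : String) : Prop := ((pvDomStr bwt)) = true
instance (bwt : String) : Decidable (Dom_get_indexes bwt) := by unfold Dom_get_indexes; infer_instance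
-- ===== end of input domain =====

-- B replaces A's streaming counter dict and pre-zeroed dicts by per-index prefix counts and a
-- single running-offset loop over the sorted alphabet (objective: simpler; not faster).

-- ===== PORT A =====
-- Python dict keys here are one-char strings; both ports compute with Char keys and convert each
-- key to its singleton String only in the returned association list (type convention).
def get_indexes (bwt : String) : List Int × (List (String × Int)) :=
  let all_values : List Char :=
    PySem.List.sorted (PySem.Set.ofList bwt.toList) (fun x => x) false
  -- for value in all_values: num_id[value] = 0; cumul[value] = 0
  let init := all_values.foldl
    (fun (st : PySem.Dict Char Int × PySem.Dict Char Int) v =>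
      (st.1.insert v 0, st.2.insert v 0))
    (PySem.Dict.empty, PySem.Dict.empty)
  -- num = []; for char in bwt: num.append(num_id[char]); num_id[char] += 1
  -- (num_id[char] cannot raise: char ∈ set(bwt) is always a key; getD _ 0 is that plain lookup)
  let loop := bwt.toList.foldl
    (fun (st : List Int × PySem.Dict Char Int) c =>
      (st.1 ++ [st.2.getD c 0], st.2.insert c (st.2.getD c 0 + 1)))
    ([], init.1)
  -- prev_count = 0; for char, count in num_id.items(): cumul[char] = prev_count; prev_count += count
  let fin := loop.2.items.foldl
    (fun (st : PySem.Dict Char Int × Int) kv => (st.1.insert kv.1 st.2, st.2 + kv.2))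
    (init.2, 0)
  (loop.1, fin.1.items.map (fun p => (String.ofList [p.1], p.2)))

-- ===== PORT B =====
def get_indexes_alt (bwt : String) : List Int × (List (String × Int)) :=
  let seq : List Char := bwt.toList
  let chars : List Char := PySem.List.sorted (PySem.Set.ofList seq) (fun x => x) false
  -- num = [seq[:i].count(c) for i, c in enumerate(seq)]
  let num : List Int := (PySem.List.enumerate seq).map
    (fun p => ((PySem.List.slice seq none (some p.1)).count p.2 : Int))
  -- cumul = {}; start = 0; for c in chars: cumul[c] = start; start += seq.count(c)
  let fin := chars.foldl
    (fun (st : List (Char × Int) × Int) c => (st.1 ++ [(c, st.2)], st.2 + (seq.count c : Int)))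
    ([], 0)
  (num, fin.1.map (fun p => (String.ofList [p.1], p.2)))

-- ===== PRECONDITION & SPEC =====
def Spec_get_indexes (bwt : String) (out : List Int × (List (String × Int))) : Prop := out = get_indexes_alt bwt
instance (bwt : String) (out : List Int × (List (String × Int))) : Decidable (Spec_get_indexes bwt out) := by unfold Spec_get_indexes; infer_instance

-- ===== CLAIM (what is proved, stated in full; the proofs are below) =====
def Claim_equal_get_indexes : Prop := ∀ (bwt : String), Dom_get_indexes bwt → Spec_get_indexes bwt (get_indexes bwt)

-- ===== LEMMAS AND PROOFS =====

-- B's rank list, written over List.take (B's slice rewrites to this below)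
def numB (l : List Char) : List Int :=
  (PySem.List.enumerate l).map (fun p => ((l.take p.1.toNat).count p.2 : Int))

lemma numB_append (t : List Char) (c : Char) :
    numB (t ++ [c]) = numB t ++ [(t.count c : Int)] := by
  unfold numB
  rw [PySem.List.enumerate_append, List.map_append]
  congr 1
  · apply List.map_congr_left
    intro p hp
    rcases (PySem.List.mem_enumerate_iff _ _ _).1 hp with ⟨k, hk, rfl⟩
    simp only [zero_add, Int.toNat_natCast]
    rw [List.take_append_of_le_length (le_of_lt hk)]
  · simp [PySem.List.enumerate]

-- A's main loop: second component is the plain counter fold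
lemma loopA_snd (l : List Char) : ∀ (acc : List Int) (d : PySem.Dict Char Int),
    (l.foldl (fun (st : List Int × PySem.Dict Char Int) c =>
        (st.1 ++ [st.2.getD c 0], st.2.insert c (st.2.getD c 0 + 1))) (acc, d)).2
      = l.foldl (fun d c => d.insert c (d.getD c 0 + 1)) d := by
  induction l with
  | nil => intro acc d; rfl
  | cons c t ih => intro acc d; exact ih _ _

-- A's main loop: the appended ranks are B's prefix counts
lemma loopA_fst (l : List Char) (d : PySem.Dict Char Int) (acc : List Int)
    (hd : ∀ c, d.getD c 0 = 0) :
    (l.foldl (fun (st : List Int × PySem.Dict Char Int) c =>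
        (st.1 ++ [st.2.getD c 0], st.2.insert c (st.2.getD c 0 + 1))) (acc, d)).1
      = acc ++ numB l := by
  induction l using List.reverseRecOn with
  | nil => simp [numB, PySem.List.enumerate]
  | append_singleton t c ih =>
      rw [List.foldl_append, numB_append]
      simp only [List.foldl_cons, List.foldl_nil]
      rw [loopA_snd, ih, PySem.Dict.getD_foldl_insert_add_one, hd]
      simp

-- A's initialisation loop over a pair of dicts is the two single-dict loops
lemma init_split (S : List Char) : ∀ (d e : PySem.Dict Char Int),
    S.foldl (fun (st : PySem.Dict Char Int × PySem.Dict Char Int) v =>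
        (st.1.insert v 0, st.2.insert v 0)) (d, e)
      = (S.foldl (fun d v => d.insert v 0) d, S.foldl (fun d v => d.insert v 0) e) := by
  induction S with
  | nil => intro d e; rfl
  | cons v t ih => intro d e; exact ih _ _

lemma zd_getD (S : List Char) (c : Char) :
    (S.foldl (fun (d : PySem.Dict Char Int) v => d.insert v 0) PySem.Dict.empty).getD c 0 = 0 := by
  suffices h : ∀ d : PySem.Dict Char Int, d.getD c 0 = 0 →
      (S.foldl (fun d v => d.insert v 0) d).getD c 0 = 0 by
    exact h _ (by simp [PySem.Dict.getD_empty])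
  induction S with
  | nil => intro d hd; exact hd
  | cons v t ih =>
      intro d hd
      exact ih _ (by rw [PySem.Dict.getD_insert]; split <;> simp [hd])

lemma zd_items (S : List Char) (hS : S.Nodup) :
    (S.foldl (fun (d : PySem.Dict Char Int) v => d.insert v 0) PySem.Dict.empty).items
      = S.map (fun v => (v, (0 : Int))) := by
  have := PySem.Dict.items_foldl_insert_fresh (l := S) (d := PySem.Dict.empty)
    (k := fun v => v) (v := fun _ => (0 : Int)) (by simp [PySem.Dict.contains_empty]) (by simpa)
  simpa using this

-- the counter fold over the zero-initialised dict: items = sorted alphabet with total counts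
lemma counter_items (l S : List Char) (hS : S.Nodup) (hsub : ∀ c ∈ l, c ∈ S) :
    (l.foldl (fun (d : PySem.Dict Char Int) c => d.insert c (d.getD c 0 + 1))
        (S.foldl (fun (d : PySem.Dict Char Int) v => d.insert v 0) PySem.Dict.empty)).items
      = S.map (fun v => (v, (l.count v : Int))) := by
  set d0 := S.foldl (fun (d : PySem.Dict Char Int) v => d.insert v 0) PySem.Dict.empty with hd0
  have hkeys0 : d0.keys = S := by
    show d0.items.map Prod.fst = S
    rw [zd_items S hS, List.map_map]
    have : (Prod.fst ∘ fun v : Char => (v, (0:Int))) = id := rfl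
    rw [this, List.map_id]
  have hkeys : (l.foldl (fun (d : PySem.Dict Char Int) c => d.insert c (d.getD c 0 + 1)) d0).keys = S := by
    rw [PySem.Dict.keys_foldl_insert, hkeys0, PySem.Set.update_eq_append_filter]
    rw [List.filter_eq_nil_iff.2, List.append_nil]
    intro y hy
    simp [hsub y ((PySem.Set.mem_ofList _ _).1 hy)]
  have hnd : (l.foldl (fun (d : PySem.Dict Char Int) c => d.insert c (d.getD c 0 + 1)) d0).keys.Nodup := by
    rw [hkeys]; exact hS
  rw [PySem.Dict.items_eq_map_keys _ hnd 0, hkeys]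
  apply List.map_congr_left
  intro v hv
  rw [PySem.Dict.getD_foldl_insert_add_one, zd_getD, zero_add]

-- overwriting an existing key rewrites its items entry in place
lemma insert_items_split (d : PySem.Dict Char Int) (pre post : List (Char × Int))
    (c : Char) (w v : Int) (h : d.items = pre ++ (c, w) :: post) (hnd : d.keys.Nodup) :
    (d.insert c v).items = pre ++ (c, v) :: post := by
  have hcont : d.contains c = true := by
    rw [PySem.Dict.contains_iff_mem_keys]
    show c ∈ d.items.map Prod.fst
    rw [h]; simp
  rw [PySem.Dict.items_insert_of_contains _ _ hcont, h]
  have hkeys : (pre.map Prod.fst ++ c :: post.map Prod.fst).Nodup := by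
    have : d.keys = pre.map Prod.fst ++ c :: post.map Prod.fst := by
      show d.items.map Prod.fst = _; rw [h]; simp
    rw [← this]; exact hnd
  rw [List.map_append, List.map_cons]
  congr 1
  · conv_rhs => rw [← List.map_id pre]
    apply List.map_congr_left
    intro p hp
    have hne : p.1 ≠ c := by
      intro he
      have hc : c ∈ pre.map Prod.fst := he ▸ List.mem_map_of_mem hp
      have hdisj := (List.nodup_append.1 hkeys).2.2
      exact hdisj c hc c List.mem_cons_self rfl
    simp [hne]
  · congr 1
    · simp
    · conv_rhs => rw [← List.map_id post]
      apply List.map_congr_left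
      intro p hp
      have hnodup := (List.nodup_append.1 hkeys).2.1
      have hne : p.1 ≠ c := by
        intro he
        have hc : c ∈ post.map Prod.fst := he ▸ List.mem_map_of_mem hp
        exact (List.nodup_cons.1 hnodup).1 hc
      simp [hne]

-- B's cumul loop with a general accumulator
lemma bfold_acc (cnt : Char → Int) (T : List Char) :
    ∀ (acc : List (Char × Int)) (prev : Int),
    (T.foldl (fun (st : List (Char × Int) × Int) c => (st.1 ++ [(c, st.2)], st.2 + cnt c)) (acc, prev)).1
      = acc ++ (T.foldl (fun (st : List (Char × Int) × Int) c => (st.1 ++ [(c, st.2)], st.2 + cnt c)) ([], prev)).1 := by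
  induction T with
  | nil => intro acc prev; simp
  | cons c t ih =>
      intro acc prev
      simp only [List.foldl_cons]
      rw [ih, ih ([] ++ [(c, prev)])]
      simp

-- A's cumul loop over items rewrites the zero entries in order to B's appended offsets
lemma cumul_loop (cnt : Char → Int) (T : List Char) :
    ∀ (d : PySem.Dict Char Int) (pre : List (Char × Int)) (prev : Int),
    d.items = pre ++ T.map (fun v => (v, (0 : Int))) → d.keys.Nodup →
    ((T.map (fun v => (v, cnt v))).foldl
        (fun (st : PySem.Dict Char Int × Int) kv => (st.1.insert kv.1 st.2, st.2 + kv.2)) (d, prev)).1.items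
      = pre ++ (T.foldl (fun (st : List (Char × Int) × Int) c => (st.1 ++ [(c, st.2)], st.2 + cnt c)) ([], prev)).1 := by
  induction T with
  | nil => intro d pre prev h hnd; simpa using h
  | cons c t ih =>
      intro d pre prev h hnd
      simp only [List.map_cons, List.foldl_cons]
      have hitems : (d.insert c prev).items = (pre ++ [(c, prev)]) ++ t.map (fun v => (v, (0 : Int))) := by
        rw [List.append_assoc, List.singleton_append]
        exact insert_items_split d pre _ c 0 prev (by simpa using h) hnd
      have hcont : d.contains c = true := by
        rw [PySem.Dict.contains_iff_mem_keys]
        show c ∈ d.items.map Prod.fst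
        rw [h]; simp
      have hnd' : (d.insert c prev).keys.Nodup := by
        rw [PySem.Dict.keys_insert_of_contains _ _ hcont]; exact hnd
      rw [ih _ _ _ hitems hnd', bfold_acc cnt t ([] ++ [(c, prev)]), List.append_assoc]
      simp

-- ===== VERDICT (by name: the statement is the Claim_ definition above) =====
theorem get_indexes_spec : Claim_equal_get_indexes := by
  intro bwt _
  unfold Spec_get_indexes
  simp only [get_indexes, get_indexes_alt]
  set l := bwt.toList with hl
  set S := PySem.List.sorted (PySem.Set.ofList l) (fun x => x) false with hSdef
  have hS : S.Nodup := ((PySem.List.sorted_perm _ _ _).nodup_iff).2 (PySem.Set.nodup_ofList l)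
  have hsub : ∀ c ∈ l, c ∈ S := by
    intro c hc
    rw [hSdef, PySem.List.mem_sorted]
    exact (PySem.Set.mem_ofList _ _).2 hc
  rw [init_split]
  rw [loopA_fst _ _ _ (zd_getD S), loopA_snd]
  have hnum : (List.map (fun p => ((List.count p.2 (PySem.List.slice l none (some p.1)) : Nat) : Int)) (PySem.List.enumerate l)) = numB l := by
    unfold numB
    apply List.map_congr_left
    intro p hp
    rcases (PySem.List.mem_enumerate_iff _ _ _).1 hp with ⟨k, hk, rfl⟩
    rw [PySem.List.slice_to _ (by simp)]
  have hzk : (List.foldl (fun (d : PySem.Dict Char Int) v => d.insert v 0) PySem.Dict.empty S).keys = S := by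
    show (List.foldl (fun (d : PySem.Dict Char Int) v => d.insert v 0) PySem.Dict.empty S).items.map Prod.fst = S
    rw [zd_items S hS, List.map_map]
    have : (Prod.fst ∘ fun v : Char => (v, (0:Int))) = id := rfl
    rw [this, List.map_id]
  simp only []
  rw [counter_items l S hS hsub]
  rw [cumul_loop (fun v => ((l.count v : Nat) : Int)) S _ [] 0 (zd_items S hS) (by rw [hzk]; exact hS)]
  rw [hnum]
  simp
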